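-- pv_equiv track=rewrite | github.com/bewest/rag-nightscout-ecosystem-alignment | tools/cgmencode/exp_clinical_1551.py | _cluster_events
-- ===== SOURCE A (Python) =====
-- def _cluster_events(indices, gap=6):
--     """Cluster event indices within `gap` steps of each other."""
--     if len(indices) == 0:
--         return []
--     clusters = [[indices[0]]]
--     for idx in indices[1:]:
--         if idx - clusters[-1][-1] <= gap:
--             clusters[-1].append(idx)
--         else:
--             clusters.append([idx])
--     return clusters
-- ===== SOURCE B (Python) =====
-- def _cluster_events(indices, gap=6):
--     """Cluster event indices within `gap` steps of each other."""
--     out = []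
--     n = len(indices)
--     i = 0
--     while i < n:
--         j = i + 1
--         while j < n and indices[j] - indices[j - 1] <= gap:
--             j += 1
--         out.append(indices[i:j])
--         i = j
--     return out
-- ===== Notes on version B (the rewrite author's own statement) =====
-- stated objective: alternative
-- what changed: Replaces A's grow-or-start mutation of the last cluster (clusters[-1].append vs clusters.append) by an index scan that finds the end of each within-gap run and emits the whole run as one slice indices[i:j].
import Mathlib
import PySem

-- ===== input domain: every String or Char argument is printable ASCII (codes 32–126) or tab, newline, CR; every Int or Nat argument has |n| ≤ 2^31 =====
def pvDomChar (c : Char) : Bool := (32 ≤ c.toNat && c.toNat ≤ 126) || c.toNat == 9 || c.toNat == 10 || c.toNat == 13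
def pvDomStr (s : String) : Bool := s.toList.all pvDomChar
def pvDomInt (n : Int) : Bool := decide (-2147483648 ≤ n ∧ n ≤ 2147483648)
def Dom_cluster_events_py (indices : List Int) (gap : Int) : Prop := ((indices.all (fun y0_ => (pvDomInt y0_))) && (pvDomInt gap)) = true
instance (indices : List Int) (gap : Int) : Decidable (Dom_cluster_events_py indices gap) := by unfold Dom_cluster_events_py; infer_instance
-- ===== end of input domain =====

-- B replaces A's grow-or-start mutation of the last cluster by an index scan that finds each
-- run's end and emits it as one slice (objective: alternative decomposition, same O(n) cost).

-- ===== PORT A =====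
-- one loop step of A: compare idx with clusters[-1][-1], append into the last cluster or start a new one
-- (clusters and its last cluster are always nonempty, so the getLastD defaults are never read)
def stepA (gap : Int) (clusters : List (List Int)) (idx : Int) : List (List Int) :=
  if idx - (clusters.getLastD []).getLastD 0 ≤ gap then
    clusters.dropLast ++ [clusters.getLastD [] ++ [idx]]
  else
    clusters ++ [[idx]]

def cluster_events_py (indices : List Int) (gap : Int) : List (List Int) :=
  match indices with
  | [] => []                                  -- if len(indices) == 0: return []
  | x :: rest => rest.foldl (stepA gap) [[x]] -- clusters = [[indices[0]]]; for idx in indices[1:]: …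

-- ===== PORT B =====
-- inner while: j advances while j < n and indices[j] - indices[j-1] <= gap (indices always in range)
def innerJ (indices : List Int) (gap : Int) (j : Nat) : Nat :=
  if h : j < indices.length ∧ indices.getD j 0 - indices.getD (j - 1) 0 ≤ gap then
    innerJ indices gap (j + 1)
  else j
termination_by indices.length - j
decreasing_by omega

theorem innerJ_ge (indices : List Int) (gap : Int) (j : Nat) : j ≤ innerJ indices gap j := by
  fun_induction innerJ indices gap j with
  | case1 j h ih => omega
  | case2 j h => omega

-- outer while: slice off indices[i:j] as one cluster, continue at i = j
def outerGo (indices : List Int) (gap : Int) (out : List (List Int)) (i : Nat) : List (List Int) :=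
  if _h : i < indices.length then
    let j := innerJ indices gap (i + 1)
    outerGo indices gap (out ++ [PySem.List.slice indices (some (i : Int)) (some (j : Int))]) j
  else out
termination_by indices.length - i
decreasing_by have := innerJ_ge indices gap (i + 1); omega

def cluster_events_py_alt (indices : List Int) (gap : Int) : List (List Int) :=
  outerGo indices gap [] 0

-- ===== PRECONDITION & SPEC =====
def Spec_cluster_events_py (indices : List Int) (gap : Int) (out : List (List Int)) : Prop := out = cluster_events_py_alt indices gap
instance (indices : List Int) (gap : Int) (out : List (List Int)) : Decidable (Spec_cluster_events_py indices gap out) := by unfold Spec_cluster_events_py; infer_instance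

-- ===== CLAIM (what is proved, stated in full; the proofs are below) =====
def Claim_equal_cluster_events_py : Prop := ∀ (indices : List Int) (gap : Int), Dom_cluster_events_py indices gap → Spec_cluster_events_py indices gap (cluster_events_py indices gap)

-- ===== LEMMAS AND PROOFS =====

-- length of the run of consecutive within-gap steps continuing from prev
def runLen (gap prev : Int) : List Int → Nat
  | [] => 0
  | y :: rest => if y - prev ≤ gap then runLen gap y rest + 1 else 0

-- canonical recursion both ports are reduced to
def clAlt (gap : Int) : List Int → List (List Int)
  | [] => []
  | x :: rest =>
      (x :: rest.take (runLen gap x rest)) :: clAlt gap (rest.drop (runLen gap x rest))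
termination_by l => l.length
decreasing_by simp

theorem clAlt_nil (gap : Int) : clAlt gap [] = [] := by rw [clAlt.eq_def]

theorem clAlt_cons (gap x : Int) (rest : List Int) :
    clAlt gap (x :: rest) =
      (x :: rest.take (runLen gap x rest)) :: clAlt gap (rest.drop (runLen gap x rest)) := by
  rw [clAlt.eq_def]

theorem foldA_eq (gap : Int) (l : List Int) : ∀ (cs : List (List Int)) (c : List Int) (x : Int),
    l.foldl (stepA gap) (cs ++ [c ++ [x]]) =
      cs ++ ((c ++ x :: l.take (runLen gap x l)) :: clAlt gap (l.drop (runLen gap x l))) := by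
  induction l with
  | nil => intro cs c x; simp [runLen, clAlt_nil]
  | cons idx l ih =>
    intro cs c x
    by_cases hle : idx - x ≤ gap
    · have hstep : stepA gap (cs ++ [c ++ [x]]) idx = cs ++ [(c ++ [x]) ++ [idx]] := by
        simp [stepA, hle]
      rw [List.foldl_cons, hstep, ih cs (c ++ [x]) idx]
      simp [runLen, hle, List.take_succ_cons]
    · have hstep : stepA gap (cs ++ [c ++ [x]]) idx = (cs ++ [c ++ [x]]) ++ [([] : List Int) ++ [idx]] := by
        simp [stepA, hle]
      rw [List.foldl_cons, hstep, ih (cs ++ [c ++ [x]]) [] idx]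
      rw [show (idx :: l).drop (runLen gap x (idx :: l)) = idx :: l by simp [runLen, hle]]
      rw [clAlt_cons]
      simp [runLen, hle]
theorem innerJ_eq (indices : List Int) (gap : Int) (j : Nat) (hj : 1 ≤ j) :
    innerJ indices gap j = j + runLen gap (indices.getD (j - 1) 0) (indices.drop j) := by
  fun_induction innerJ indices gap j with
  | case1 j h ih =>
    have hd : indices.drop j = indices.getD j 0 :: indices.drop (j + 1) := by
      rw [List.getD_eq_getElem _ _ h.1, List.drop_eq_getElem_cons h.1]
    rw [ih (by omega), hd, runLen]
    simp only [h.2, if_pos]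
    have : j + 1 - 1 = j := by omega
    rw [this]
    omega
  | case2 j h =>
    rcases Nat.lt_or_ge j indices.length with hlt | hge
    · have hd : indices.drop j = indices.getD j 0 :: indices.drop (j + 1) := by
        rw [List.getD_eq_getElem _ _ hlt, List.drop_eq_getElem_cons hlt]
      have hgt : ¬ (indices.getD j 0 - indices.getD (j - 1) 0 ≤ gap) := by tauto
      rw [hd, runLen, if_neg hgt]
      omega
    · rw [List.drop_eq_nil_of_le hge, runLen]
      omega

theorem outerGo_eq (indices : List Int) (gap : Int) (out : List (List Int)) (i : Nat) :
    outerGo indices gap out i = out ++ clAlt gap (indices.drop i) := by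
  fun_induction outerGo indices gap out i with
  | case1 out i h j ih =>
    have hd : indices.drop i = indices.getD i 0 :: indices.drop (i + 1) := by
      rw [List.getD_eq_getElem _ _ h, List.drop_eq_getElem_cons h]
    have hJ : j = i + 1 + runLen gap (indices.getD i 0) (indices.drop (i + 1)) := by
      have := innerJ_eq indices gap (i + 1) (by omega)
      simpa using this
    set r := runLen gap (indices.getD i 0) (indices.drop (i + 1)) with hr
    have hslice : PySem.List.slice indices (some (i : Int)) (some ((j : Nat) : Int)) =
        indices.getD i 0 :: (indices.drop (i + 1)).take r := by
      rw [hJ]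
      have : ((i : Int) + 1 + (r : Int)) = ((i : Int) + ((1 + r : Nat) : Int)) := by push_cast; ring
      rw [show ((i + 1 + r : Nat) : Int) = (i : Int) + ((1 + r : Nat) : Int) by push_cast; ring]
      rw [PySem.List.slice_natCast_add, hd, Nat.add_comm 1 r]
      simp [List.take_succ_cons]
    have hdropj : indices.drop j = (indices.drop (i + 1)).drop r := by
      rw [hJ, ← List.drop_drop]
    rw [ih, hslice, hdropj, hd, clAlt_cons]
    simp [-List.getD_eq_getElem?_getD]
    rw [← hr]
    exact ⟨rfl, rfl⟩
  | case2 out i h =>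
    have : indices.length ≤ i := by omega
    rw [List.drop_eq_nil_of_le this, clAlt_nil]
    simp

-- ===== VERDICT (by name: the statement is the Claim_ definition above) =====
theorem cluster_events_py_spec : Claim_equal_cluster_events_py := by
  intro indices gap _
  unfold Spec_cluster_events_py cluster_events_py_alt
  rw [outerGo_eq]
  cases indices with
  | nil => simp [cluster_events_py, clAlt_nil]
  | cons x rest =>
    show cluster_events_py (x :: rest) gap = clAlt gap (x :: rest)
    have h0 : ([[x]] : List (List Int)) = [] ++ [([] : List Int) ++ [x]] := by simp
    rw [cluster_events_py, h0, foldA_eq, clAlt_cons]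
    simp
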